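-- pv_equiv track=rewrite | github.com/muhsina419/PEC-HACKS | ecosphere_backend/waste/views.py | _alerts_summary
-- ===== SOURCE A (Python) =====
-- def _alerts_summary(data):
--     if not data:
--         return "All clear — no items expiring in the next week."
--     urgent = [d for d in data if d["alert_stage"] in {"expiry", "grace", "overdue"}]
--     if urgent:
--         return f"{len(urgent)} items need action today to protect your EcoScore."
--     soon = [d for d in data if d["alert_stage"] in {"3d", "7d"}]
--     return f"{len(soon)} items are approaching expiry — plan reuse or compost now."
-- ===== SOURCE B (Python) =====
-- def _alerts_summary(data):
--     if not data:
--         return "All clear — no items expiring in the next week."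
--     # build a frequency table of alert stages once, then derive both counts by lookup
--     tally = {}
--     for d in data:
--         s = d["alert_stage"]
--         tally[s] = tally.get(s, 0) + 1
--     urgent = tally.get("expiry", 0) + tally.get("grace", 0) + tally.get("overdue", 0)
--     if urgent:
--         return f"{urgent} items need action today to protect your EcoScore."
--     soon = tally.get("3d", 0) + tally.get("7d", 0)
--     return f"{soon} items are approaching expiry — plan reuse or compost now."
-- ===== Notes on version B (the rewrite author's own statement) =====
-- stated objective: alternative
-- what changed: Instead of filtering the records per category, B aggregates a histogram (dict) of alert_stage values in one pass and derives the urgent and soon counts by summing per-stage table lookups; correct because the three urgent stages (and the two soon stages) are distinct strings, so the filter length equals the sum of their frequencies.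
import Mathlib
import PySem

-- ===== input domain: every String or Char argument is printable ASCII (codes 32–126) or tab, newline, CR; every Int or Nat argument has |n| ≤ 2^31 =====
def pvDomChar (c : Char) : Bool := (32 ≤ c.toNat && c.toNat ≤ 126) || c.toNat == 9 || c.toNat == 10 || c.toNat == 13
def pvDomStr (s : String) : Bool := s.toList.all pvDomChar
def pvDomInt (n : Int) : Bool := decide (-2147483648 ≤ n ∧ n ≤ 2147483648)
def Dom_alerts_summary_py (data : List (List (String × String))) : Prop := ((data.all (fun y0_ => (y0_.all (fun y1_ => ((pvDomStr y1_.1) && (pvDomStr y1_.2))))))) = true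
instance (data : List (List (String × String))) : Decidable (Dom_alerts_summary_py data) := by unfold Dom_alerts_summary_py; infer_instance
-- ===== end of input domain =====

-- B replaces A's per-category filtering with a one-pass histogram of alert_stage values, deriving both counts by table lookups.


-- ===== PORT A =====
-- d["alert_stage"]; the KeyError case (key absent) is excluded by Pre_, so the
-- default "" is never reached on admitted inputs ("" is in neither membership set).
def pvStageA (d : List (String × String)) : String :=
  (PySem.Dict.get? (PySem.Dict.mk d) "alert_stage").getD ""

def pvIsUrgent (d : List (String × String)) : Bool :=
  pvStageA d == "expiry" || pvStageA d == "grace" || pvStageA d == "overdue"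

def pvIsSoon (d : List (String × String)) : Bool :=
  pvStageA d == "3d" || pvStageA d == "7d"

def alerts_summary_py (data : List (List (String × String))) : String :=
  if data = [] then "All clear — no items expiring in the next week."
  else
    let urgent := data.filter pvIsUrgent
    if urgent ≠ [] then
      PySem.Int.toStr (urgent.length : Int) ++ " items need action today to protect your EcoScore."
    else
      let soon := data.filter pvIsSoon
      PySem.Int.toStr (soon.length : Int) ++ " items are approaching expiry — plan reuse or compost now."

-- ===== PORT B =====
-- same lookup d["alert_stage"] as in Source B (KeyError excluded by Pre_)
def pvStageB (d : List (String × String)) : String :=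
  (PySem.Dict.get? (PySem.Dict.mk d) "alert_stage").getD ""

-- the histogram loop: for d in data: tally[s] = tally.get(s, 0) + 1
def pvTally (data : List (List (String × String))) : PySem.Dict String Int :=
  data.foldl (fun t d => t.insert (pvStageB d) (t.getD (pvStageB d) 0 + 1)) PySem.Dict.empty

def alerts_summary_py_alt (data : List (List (String × String))) : String :=
  if data = [] then "All clear — no items expiring in the next week."
  else
    let tally := pvTally data
    let urgent := tally.getD "expiry" 0 + tally.getD "grace" 0 + tally.getD "overdue" 0
    if urgent ≠ 0 then
      PySem.Int.toStr urgent ++ " items need action today to protect your EcoScore."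
    else
      let soon := tally.getD "3d" 0 + tally.getD "7d" 0
      PySem.Int.toStr soon ++ " items are approaching expiry — plan reuse or compost now."

-- ===== PRECONDITION & SPEC =====
-- Pre_ excludes inputs where some dict lacks the key "alert_stage": there Python A raises KeyError.
def Pre_alerts_summary_py (data : List (List (String × String))) : Prop :=
  data.all (fun d => (PySem.Dict.get? (PySem.Dict.mk d) "alert_stage").isSome) = true
instance (data : List (List (String × String))) : Decidable (Pre_alerts_summary_py data) := by
  unfold Pre_alerts_summary_py; infer_instance

def pvWitness_alerts_summary_py : (List (List (String × String))) :=
  [[("alert_stage", "3d")], [("alert_stage", "overdue")]]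

def Spec_alerts_summary_py (data : List (List (String × String))) (out : String) : Prop := out = alerts_summary_py_alt data
instance (data : List (List (String × String))) (out : String) : Decidable (Spec_alerts_summary_py data out) := by unfold Spec_alerts_summary_py; infer_instance

-- ===== CLAIM (what is proved, stated in full; the proofs are below) =====
def Claim_equal_alerts_summary_py : Prop := ∀ (data : List (List (String × String))), Dom_alerts_summary_py data → Pre_alerts_summary_py data → Spec_alerts_summary_py data (alerts_summary_py data)

-- ===== LEMMAS AND PROOFS =====

lemma stageA_eq_stageB : pvStageA = pvStageB := rfl

-- the tally is Counter(stages)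
lemma tally_getD (data : List (List (String × String))) (v : String) :
    (pvTally data).getD v 0 = ((data.map pvStageB).count v : Int) := by
  unfold pvTally
  rw [← List.foldl_map (f := pvStageB)
        (g := fun t s => PySem.Dict.insert t s (PySem.Dict.getD t s 0 + 1))]
  rw [PySem.Dict.getD_foldl_insert_add_one]
  simp

-- a filter by membership in a set of distinct stage names counts as a sum of per-stage counts
lemma filter_urgent_len (data : List (List (String × String))) :
    (data.filter pvIsUrgent).length =
      (data.map pvStageA).count "expiry" + (data.map pvStageA).count "grace"
        + (data.map pvStageA).count "overdue" := by
  induction data with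
  | nil => simp
  | cons d rest ih =>
    simp only [List.filter_cons, List.map_cons, List.count_cons, pvIsUrgent]
    by_cases h1 : pvStageA d = "expiry" <;> by_cases h2 : pvStageA d = "grace" <;>
      by_cases h3 : pvStageA d = "overdue" <;>
      simp_all <;> omega

lemma filter_soon_len (data : List (List (String × String))) :
    (data.filter pvIsSoon).length =
      (data.map pvStageA).count "3d" + (data.map pvStageA).count "7d" := by
  induction data with
  | nil => simp
  | cons d rest ih =>
    simp only [List.filter_cons, List.map_cons, List.count_cons, pvIsSoon]
    by_cases h1 : pvStageA d = "3d" <;> by_cases h2 : pvStageA d = "7d" <;>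
      simp_all <;> omega

-- ===== VERDICT (by name: the statement is the Claim_ definition above) =====
theorem alerts_summary_py_spec : Claim_equal_alerts_summary_py := by
  intro data _ _
  unfold Spec_alerts_summary_py alerts_summary_py alerts_summary_py_alt
  by_cases hnil : data = []
  · simp [hnil]
  · simp only [hnil, ite_false]
    have hu := filter_urgent_len data
    have hs := filter_soon_len data
    rw [tally_getD, tally_getD, tally_getD, tally_getD, tally_getD, ← stageA_eq_stageB]
    by_cases hemp : data.filter pvIsUrgent = []
    · have h0 : (data.filter pvIsUrgent).length = 0 := by simp [hemp]
      have : ((data.map pvStageA).count "expiry" : Int) + (data.map pvStageA).count "grace"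
          + (data.map pvStageA).count "overdue" = 0 := by omega
      simp only [hemp, this]
      simp only [ne_eq, not_true_eq_false, ite_false]
      rw [hs]; push_cast; ring_nf
    · have hlen : 0 < (data.filter pvIsUrgent).length := List.length_pos_iff.mpr hemp
      have : ((data.map pvStageA).count "expiry" : Int) + (data.map pvStageA).count "grace"
          + (data.map pvStageA).count "overdue" ≠ 0 := by omega
      simp only [hemp, this, ne_eq, not_false_eq_true, ite_true]
      rw [hu]; push_cast; ring_nf
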